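-- pv_equiv track=rewrite | github.com/as030pc/MisionTIC | Fundamentos de Programacion - Python/Semana 6/Traductor.py | traductorSuper1
-- ===== SOURCE A (Python) =====
-- def EnEs(palabra_en_ingles): #THEY
--     dicc={ "SHE":"ELLA",
--            "HE":"EL",
--              "WE":"NOSOTROS" ,
--              "IS":"ES",
--              "ARE":"SOMOS",
--              "INTELLIGENT":"INTELIGENTE(S)",
--              "FRIENDLY":"AMIGABLE(S)",
--               "FAST":"VELOZ(ES)",
--                 "STRONG":"FUERTE"
--           }
--
--     return str(dicc.get(palabra_en_ingles))
--
-- def traductorSuper1(cadena_palabras):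
--     #divido la cadena por sus espacios
--     palabras=cadena_palabras.split(" @ ")
--     rdo=""
--
--     for i in palabras:
--         lpal=i.split("-")
--         for k in lpal:
--             rdo=rdo+EnEs(k)+" "
--
--     return rdo
-- ===== SOURCE B (Python) =====
-- DICC = {"SHE": "ELLA", "HE": "EL", "WE": "NOSOTROS", "IS": "ES",
--         "ARE": "SOMOS", "INTELLIGENT": "INTELIGENTE(S)", "FRIENDLY": "AMIGABLE(S)",
--         "FAST": "VELOZ(ES)", "STRONG": "FUERTE"}
--
-- def traductorSuper1(cadena_palabras):
--     # streaming scanner: one left-to-right pass over the characters, no split;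
--     # flush the current token buffer on each delimiter (" @ " or "-")
--     out = []
--     buf = []
--     i = 0
--     n = len(cadena_palabras)
--     while i < n:
--         if cadena_palabras.startswith(" @ ", i):
--             out.append(DICC.get("".join(buf), "None") + " ")
--             buf = []
--             i += 3
--         elif cadena_palabras[i] == "-":
--             out.append(DICC.get("".join(buf), "None") + " ")
--             buf = []
--             i += 1
--         else:
--             buf.append(cadena_palabras[i])
--             i += 1
--     out.append(DICC.get("".join(buf), "None") + " ")
--     return "".join(out)
-- ===== Notes on version B (the rewrite author's own statement) =====
-- stated objective: alternative
-- what changed: Replaces A's two staged splits with nested loops over a string accumulator by a single-pass character-level scanner: an index loop with delimiter lookahead that flushes a token buffer through the dict as it goes, building the output as a list of pieces joined once.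
import Mathlib
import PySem

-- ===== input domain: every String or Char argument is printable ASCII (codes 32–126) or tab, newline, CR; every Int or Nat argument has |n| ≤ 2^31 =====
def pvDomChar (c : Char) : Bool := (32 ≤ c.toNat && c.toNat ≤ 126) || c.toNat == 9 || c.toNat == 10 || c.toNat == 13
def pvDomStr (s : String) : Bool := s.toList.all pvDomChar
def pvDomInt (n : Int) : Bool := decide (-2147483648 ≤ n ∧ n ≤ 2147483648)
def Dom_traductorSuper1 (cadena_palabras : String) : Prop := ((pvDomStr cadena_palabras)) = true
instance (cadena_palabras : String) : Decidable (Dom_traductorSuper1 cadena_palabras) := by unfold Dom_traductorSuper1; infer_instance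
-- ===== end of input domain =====

-- B replaces A's nested splits over an accumulator by a single character-level scanner (index loop with " @ "/'-' lookahead, streaming flushes); alternative decomposition, same cost.


-- ===== PORT A =====
-- A's dictionary as a PySem.Dict over char lists
def diccA : PySem.Dict (List Char) (List Char) :=
  PySem.Dict.ofList [("SHE".toList, "ELLA".toList), ("HE".toList, "EL".toList),
    ("WE".toList, "NOSOTROS".toList), ("IS".toList, "ES".toList),
    ("ARE".toList, "SOMOS".toList), ("INTELLIGENT".toList, "INTELIGENTE(S)".toList),
    ("FRIENDLY".toList, "AMIGABLE(S)".toList), ("FAST".toList, "VELOZ(ES)".toList),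
    ("STRONG".toList, "FUERTE".toList)]

-- str(dicc.get(w)): the hit itself, or the string "None"
def EnEs (palabra_en_ingles : List Char) : List Char :=
  match diccA.get? palabra_en_ingles with
  | some v => v
  | none => "None".toList

def traductorSuper1 (cadena_palabras : String) : String :=
  let palabras := PySem.Chars.splitOn cadena_palabras.toList " @ ".toList
  let rdo := palabras.foldl (fun rdo i =>
    (PySem.Chars.splitOn i "-".toList).foldl (fun rdo k => rdo ++ EnEs k ++ [' ']) rdo) []
  String.ofList rdo

-- ===== PORT B =====
-- B's module-level DICC
def DICC : PySem.Dict (List Char) (List Char) :=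
  PySem.Dict.ofList [("SHE".toList, "ELLA".toList), ("HE".toList, "EL".toList),
    ("WE".toList, "NOSOTROS".toList), ("IS".toList, "ES".toList),
    ("ARE".toList, "SOMOS".toList), ("INTELLIGENT".toList, "INTELIGENTE(S)".toList),
    ("FRIENDLY".toList, "AMIGABLE(S)".toList), ("FAST".toList, "VELOZ(ES)".toList),
    ("STRONG".toList, "FUERTE".toList)]

-- DICC.get("".join(buf), "None") + " "
def flushB (buf : List Char) : List Char := DICC.getD buf "None".toList ++ [' ']

-- B's while loop: out/buf accumulators, remaining characters in place of the index i
def scanB (out buf : List Char) : List Char → List Char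
  | [] => out ++ flushB buf
  | c :: rest =>
    if (" @ ".toList).isPrefixOf (c :: rest) then scanB (out ++ flushB buf) [] (rest.drop 2)
    else if c = '-' then scanB (out ++ flushB buf) [] rest
    else scanB out (buf ++ [c]) rest
termination_by l => l.length
decreasing_by all_goals simp_all

def traductorSuper1_alt (cadena_palabras : String) : String :=
  String.ofList (scanB [] [] cadena_palabras.toList)

-- ===== PRECONDITION & SPEC =====
def Spec_traductorSuper1 (cadena_palabras : String) (out : String) : Prop := out = traductorSuper1_alt cadena_palabras
instance (cadena_palabras : String) (out : String) : Decidable (Spec_traductorSuper1 cadena_palabras out) := by unfold Spec_traductorSuper1; infer_instance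

-- ===== CLAIM (what is proved, stated in full; the proofs are below) =====
def Claim_equal_traductorSuper1 : Prop := ∀ (cadena_palabras : String), Dom_traductorSuper1 cadena_palabras → Spec_traductorSuper1 cadena_palabras (traductorSuper1 cadena_palabras)

-- ===== LEMMAS AND PROOFS =====

-- structural model of Chars.splitOn (for a nonempty pattern)
def splS (sep : List Char) : List Char → List (List Char)
  | [] => [[]]
  | c :: t =>
    if sep.isPrefixOf (c :: t) then [] :: splS sep (List.drop (sep.length - 1) t)
    else (splS sep t).modifyHead (c :: ·)
termination_by l => l.length
decreasing_by all_goals simp_all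

-- the two-delimiter split B's scanner performs
def spl2 : List Char → List (List Char)
  | [] => [[]]
  | c :: t =>
    if [' ', '@', ' '].isPrefixOf (c :: t) then [] :: spl2 (t.drop 2)
    else if c = '-' then [] :: spl2 t
    else (spl2 t).modifyHead (c :: ·)
termination_by l => l.length
decreasing_by all_goals simp_all

theorem modifyHead_fun_id {α : Type} (l : List α) : List.modifyHead (fun x => x) l = l := by
  cases l <;> simp

theorem splS_ne_nil (sep l) : splS sep l ≠ [] := by
  induction l using splS.induct sep with
  | case1 => simp [splS]
  | case2 c t hp _ => rw [splS]; simp [hp]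
  | case3 c t hp ih => rw [splS]; simp only [if_neg hp]; cases h : splS sep t <;> simp_all [List.modifyHead]

theorem spl2_ne_nil (l) : spl2 l ≠ [] := by
  induction l using spl2.induct with
  | case1 => simp [spl2]
  | case2 c t hp _ => rw [spl2]; simp [hp]
  | case3 t hp _ => rw [spl2]; simp [hp]
  | case4 c t hp hc ih => rw [spl2]; simp only [if_neg hp, if_neg hc]; cases h : spl2 t <;> simp_all [List.modifyHead]

theorem splS_go (sep : List Char) (hsep : sep ≠ []) :
    ∀ fuel l cur acc, l.length < fuel →
      PySem.Chars.splitOn.go sep fuel l cur acc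
        = acc.reverse ++ (splS sep l).modifyHead (cur.reverse ++ ·) := by
  intro fuel
  induction fuel with
  | zero => intro l cur acc h; omega
  | succ n ih =>
    intro l cur acc h
    cases l with
    | nil => simp [PySem.Chars.splitOn.go, splS]
    | cons c t =>
      rw [PySem.Chars.splitOn.go]
      by_cases hp : sep.isPrefixOf (c :: t)
      · have hdrop : List.drop sep.length (c :: t) = List.drop (sep.length - 1) t := by
          cases sep with
          | nil => exact absurd rfl hsep
          | cons o os => simp
        have hlt : (List.drop (sep.length - 1) t).length < n := by
          simp at h ⊢
          have : 1 ≤ sep.length := by cases sep <;> simp_all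
          omega
        rw [if_pos hp, hdrop, ih _ _ _ hlt]
        simp [splS, hp, modifyHead_fun_id]
      · rw [if_neg hp, ih _ _ _ (by simp at h ⊢; omega)]
        obtain ⟨hh, hs, hhs⟩ := List.exists_cons_of_ne_nil (splS_ne_nil sep t)
        simp [splS, hp, hhs]

theorem splitOn_eq_splS (s sep : List Char) (hsep : sep ≠ []) :
    PySem.Chars.splitOn s sep = splS sep s := by
  unfold PySem.Chars.splitOn
  have := splS_go sep hsep (s.length + 1) s [] [] (by omega)
  simpa [modifyHead_fun_id] using this

theorem splitOn_dash (l : List Char) : PySem.Chars.splitOn l "-".toList = splS ['-'] l :=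
  splitOn_eq_splS l _ (by decide)

theorem splitOn_at (l : List Char) :
    PySem.Chars.splitOn l " @ ".toList = splS [' ', '@', ' '] l :=
  splitOn_eq_splS l _ (by decide)

-- B's two-delimiter scan = A's nested split
theorem spl2_eq_flatMap (s : List Char) :
    spl2 s = (splS [' ', '@', ' '] s).flatMap (fun p => splS ['-'] p) := by
  induction s using spl2.induct with
  | case1 => rw [spl2, splS]; rw [List.flatMap_cons]; rw [splS]; simp
  | case2 c t hp ih =>
    rw [spl2, if_pos hp,
      show splS [' ', '@', ' '] (c :: t) = [] :: splS [' ', '@', ' '] (t.drop 2) by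
        rw [splS]; simp [hp]]
    simp only [List.flatMap_cons]
    rw [show splS ['-'] [] = [[]] by rw [splS], ih]
    simp
  | case3 t hp ih =>
    rw [spl2, if_neg hp, if_pos rfl,
      show splS [' ', '@', ' '] ('-' :: t) = (splS [' ', '@', ' '] t).modifyHead ('-' :: ·) by
        rw [splS]; simp [hp]]
    obtain ⟨hh, hs, hhs⟩ := List.exists_cons_of_ne_nil (splS_ne_nil [' ', '@', ' '] t)
    rw [ih, hhs, show List.modifyHead (fun x => '-' :: x) (hh :: hs) = ('-' :: hh) :: hs from rfl]
    simp only [List.flatMap_cons]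
    rw [show splS ['-'] ('-' :: hh) = [] :: splS ['-'] hh by
      rw [splS]; simp [List.isPrefixOf]]
    simp
  | case4 c t hp hc ih =>
    rw [spl2, if_neg hp, if_neg hc,
      show splS [' ', '@', ' '] (c :: t) = (splS [' ', '@', ' '] t).modifyHead (c :: ·) by
        rw [splS]; simp [hp]]
    obtain ⟨hh, hs, hhs⟩ := List.exists_cons_of_ne_nil (splS_ne_nil [' ', '@', ' '] t)
    rw [ih, hhs, show List.modifyHead (fun x => c :: x) (hh :: hs) = (c :: hh) :: hs from rfl]
    simp only [List.flatMap_cons]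
    rw [show splS ['-'] (c :: hh) = (splS ['-'] hh).modifyHead (c :: ·) by
      rw [splS]; simp [List.isPrefixOf, Ne.symm hc]]
    obtain ⟨gh, gs, ghs⟩ := List.exists_cons_of_ne_nil (splS_ne_nil ['-'] hh)
    simp [ghs, List.modifyHead]

theorem EnEs_eq (k : List Char) : EnEs k ++ [' '] = flushB k := by
  unfold EnEs flushB PySem.Dict.getD
  rw [show DICC = diccA from rfl]
  cases diccA.get? k <;> simp

-- B's scanner characterised by spl2
theorem scanB_spec : ∀ (l out buf : List Char),
    scanB out buf l = out ++ (((spl2 l).modifyHead (fun x => buf ++ x)).map flushB).flatten := by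
  intro l
  induction l using spl2.induct with
  | case1 => intro out buf; rw [scanB, spl2]; simp
  | case2 c t hp ih =>
    intro out buf
    have hp' : (" @ ".toList).isPrefixOf (c :: t) = true := hp
    rw [scanB, if_pos hp', ih, spl2, if_pos hp]
    simp [modifyHead_fun_id]
  | case3 t hp ih =>
    intro out buf
    have hp' : ¬ (" @ ".toList).isPrefixOf ('-' :: t) = true := hp
    rw [scanB, if_neg hp', if_pos rfl, ih, spl2, if_neg hp, if_pos rfl]
    simp [modifyHead_fun_id]
  | case4 c t hp hc ih =>
    intro out buf
    have hp' : ¬ (" @ ".toList).isPrefixOf (c :: t) = true := hp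
    rw [scanB, if_neg hp', if_neg hc, ih, spl2, if_neg hp, if_neg hc]
    obtain ⟨hh, hs, hhs⟩ := List.exists_cons_of_ne_nil (spl2_ne_nil t)
    simp [hhs, List.modifyHead]

-- A's nested foldl flattened
theorem foldl_append_flatten (f : List Char → List Char) :
    ∀ (l : List (List Char)) (acc : List Char),
      l.foldl (fun r k => r ++ f k) acc = acc ++ (l.map f).flatten := by
  intro l
  induction l with
  | nil => simp
  | cons h t ih => intro acc; simp [ih, List.append_assoc]

theorem hfoldL : ∀ (ps : List (List Char)) (acc : List Char),
    ps.foldl (fun rdo i => (splS ['-'] i).foldl (fun rdo k => rdo ++ EnEs k ++ [' ']) rdo) acc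
      = acc ++ ((ps.flatMap (fun p => splS ['-'] p)).map flushB).flatten := by
  intro ps
  induction ps with
  | nil => simp
  | cons h t ih =>
    intro acc
    simp only [List.foldl_cons]
    have : ∀ (l : List (List Char)) (a : List Char),
        l.foldl (fun rdo k => rdo ++ EnEs k ++ [' ']) a = a ++ (l.map flushB).flatten := by
      intro l a
      have := foldl_append_flatten (fun k => EnEs k ++ [' ']) l a
      simp only [List.append_assoc] at this ⊢
      rw [this]
      congr 1
      congr 1
      exact List.map_congr_left (fun k _ => EnEs_eq k)
    rw [this, ih]
    simp [List.append_assoc]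

-- ===== VERDICT (by name: the statement is the Claim_ definition above) =====
theorem traductorSuper1_spec : Claim_equal_traductorSuper1 := by
  intro s _
  unfold Spec_traductorSuper1 traductorSuper1 traductorSuper1_alt
  simp only [splitOn_dash, splitOn_at]
  rw [hfoldL, scanB_spec, spl2_eq_flatMap]
  simp [modifyHead_fun_id]
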